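-- pv_equiv track=rewrite | github.com/sergiombdev/sis420-ing.sistemas-S.M.B | laboratorios/laboratorio02.py | generarLaberinto
-- ===== SOURCE A (Python) =====
-- def generarLaberinto( filas, columnas ):
--     laberintoTemporal = []
--     for row in range( 0, filas ):
--         fila = []
--         for column in range( 0, columnas ):
--             if( row == 0 or column == 0 or row == filas-1 or column == columnas - 1 ):
--                 fila.append( "#" )
--             else:
--                 fila.append( " " )
--
--         laberintoTemporal.append( fila )
--
--     return laberintoTemporal
-- ===== SOURCE B (Python) =====
-- def generarLaberinto(filas, columnas):
--     if filas <= 0: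
--         return []
--     borde = ["#"] * columnas
--     if columnas >= 2:
--         interior = ["#"] + [" "] * (columnas - 2) + ["#"]
--     else:
--         interior = ["#"] * columnas
--     return [list(borde) if r == 0 or r == filas - 1 else list(interior)
--             for r in range(filas)]
-- ===== Notes on version B (the rewrite author's own statement) =====
-- stated objective: simpler
-- what changed: Classifies each row by its index and builds the two row patterns once (['#']*columnas border row, '#'+spaces+'#' interior row), copying a pattern per row instead of testing the border condition cell by cell in a nested loop.
import Mathlib
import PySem

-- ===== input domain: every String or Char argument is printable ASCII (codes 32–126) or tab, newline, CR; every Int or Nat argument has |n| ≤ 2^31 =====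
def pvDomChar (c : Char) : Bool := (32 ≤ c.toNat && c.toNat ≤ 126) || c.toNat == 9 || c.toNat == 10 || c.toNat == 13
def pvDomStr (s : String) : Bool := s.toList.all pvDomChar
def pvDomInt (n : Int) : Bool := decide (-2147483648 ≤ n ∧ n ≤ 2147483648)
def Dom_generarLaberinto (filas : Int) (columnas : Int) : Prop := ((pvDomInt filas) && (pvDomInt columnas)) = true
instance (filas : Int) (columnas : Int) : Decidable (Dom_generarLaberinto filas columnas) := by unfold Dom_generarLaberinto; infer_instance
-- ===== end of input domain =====

-- ===== PORT A =====
-- Transliteration of A: nested for-loops over range, per-cell border test, append.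
def generarLaberinto (filas : Int) (columnas : Int) : List (List String) :=
  (PySem.List.pyRange 0 filas 1).foldl (fun laberintoTemporal row =>
    laberintoTemporal ++
      [(PySem.List.pyRange 0 columnas 1).foldl (fun fila column =>
        fila ++ [if row = 0 ∨ column = 0 ∨ row = filas - 1 ∨ column = columnas - 1
                 then "#" else " "]) []]) []

-- ===== PORT B =====
-- B: builds the two row patterns once, classifies each row by its index.
def generarLaberinto_alt (filas : Int) (columnas : Int) : List (List String) :=
  if filas ≤ 0 then [] else
  let borde := List.replicate columnas.toNat "#"
  let interior := if columnas ≥ 2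
    then "#" :: (List.replicate (columnas - 2).toNat " " ++ ["#"])
    else List.replicate columnas.toNat "#"
  (PySem.List.pyRange 0 filas 1).map
    (fun r => if r = 0 ∨ r = filas - 1 then borde else interior)

-- ===== PRECONDITION & SPEC =====
def Spec_generarLaberinto (filas : Int) (columnas : Int) (out : List (List String)) : Prop := out = generarLaberinto_alt filas columnas
instance (filas : Int) (columnas : Int) (out : List (List String)) : Decidable (Spec_generarLaberinto filas columnas out) := by unfold Spec_generarLaberinto; infer_instance

-- ===== CLAIM (what is proved, stated in full; the proofs are below) =====
def Claim_equal_generarLaberinto : Prop := ∀ (filas : Int) (columnas : Int), Dom_generarLaberinto filas columnas → Spec_generarLaberinto filas columnas (generarLaberinto filas columnas)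

-- ===== LEMMAS AND PROOFS =====

-- ===== VERDICT (by name: the statement is the Claim_ definition above) =====
-- inner loop of A as a map over the column range
theorem innerA_eq_map (filas columnas row : Int) :
    (PySem.List.pyRange 0 columnas 1).foldl (fun fila column =>
      fila ++ [if row = 0 ∨ column = 0 ∨ row = filas - 1 ∨ column = columnas - 1
               then "#" else " "]) [] =
    (PySem.List.pyRange 0 columnas 1).map (fun column =>
      if row = 0 ∨ column = 0 ∨ row = filas - 1 ∨ column = columnas - 1
      then "#" else " ") := by
  simpa using PySem.List.foldl_append_singleton_eq_map
    (f := fun column => if row = 0 ∨ column = 0 ∨ row = filas - 1 ∨ column = columnas - 1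
      then "#" else " ") (l := PySem.List.pyRange 0 columnas 1) (acc := [])

theorem map_const_range {α : Type} (n : Int) (g : Int → α) (a : α)
    (h : ∀ x, 0 ≤ x → x < n → g x = a) :
    (PySem.List.pyRange 0 n 1).map g = List.replicate n.toNat a := by
  rw [List.eq_replicate_iff]
  refine ⟨by simp [PySem.List.length_pyRange_one], ?_⟩
  intro b hb
  rw [List.mem_map] at hb
  obtain ⟨x, hx, rfl⟩ := hb
  rw [PySem.List.mem_pyRange_one] at hx
  exact h x hx.1 hx.2

-- border row: every cell is "#"
theorem inner_border (filas columnas row : Int) (hrow : row = 0 ∨ row = filas - 1) :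
    (PySem.List.pyRange 0 columnas 1).map (fun column =>
      if row = 0 ∨ column = 0 ∨ row = filas - 1 ∨ column = columnas - 1
      then "#" else " ") = List.replicate columnas.toNat "#" := by
  apply map_const_range
  intro x _ _
  rcases hrow with h | h <;> simp [h]

-- interior row: "#", spaces, "#" (degenerate when columnas ≤ 1)
theorem inner_interior (filas columnas row : Int) (h0 : row ≠ 0) (h1 : row ≠ filas - 1) :
    (PySem.List.pyRange 0 columnas 1).map (fun column =>
      if row = 0 ∨ column = 0 ∨ row = filas - 1 ∨ column = columnas - 1
      then "#" else " ") =
    (if columnas ≥ 2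
      then "#" :: (List.replicate (columnas - 2).toNat " " ++ ["#"])
      else List.replicate columnas.toNat "#") := by
  by_cases hc : columnas ≥ 2
  · rw [if_pos hc]
    rw [PySem.List.pyRange_one_append 0 (columnas - 1) columnas (by omega) (by omega),
        PySem.List.pyRange_one_cons (by omega : (0:Int) < columnas - 1)]
    have hlast : PySem.List.pyRange (columnas - 1) columnas 1 = [columnas - 1] := by
      rw [PySem.List.pyRange_one_cons (by omega), PySem.List.pyRange_one_eq_nil (by omega)]
    simp only [List.map_append, List.map_cons]
    rw [hlast]
    have hmid : (PySem.List.pyRange (0+1) (columnas-1) 1).map (fun column =>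
        if row = 0 ∨ column = 0 ∨ row = filas - 1 ∨ column = columnas - 1
        then "#" else " ") = List.replicate (columnas - 2).toNat " " := by
      rw [List.eq_replicate_iff]
      refine ⟨by simp [PySem.List.length_pyRange_one]; omega, ?_⟩
      intro b hb
      rw [List.mem_map] at hb
      obtain ⟨x, hx, rfl⟩ := hb
      rw [PySem.List.mem_pyRange_one] at hx
      have hx0 : x ≠ 0 := by omega
      have hxl : x ≠ columnas - 1 := by omega
      simp [h0, h1, hx0, hxl]
    rw [hmid]
    simp [h0, h1]
  · rw [if_neg hc]
    apply map_const_range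
    intro x hx0 hxn
    have : x = 0 := by omega
    simp [this]

theorem generarLaberinto_spec : Claim_equal_generarLaberinto := by
  intro filas columnas _
  unfold Spec_generarLaberinto generarLaberinto generarLaberinto_alt
  rw [PySem.List.foldl_append_singleton_eq_map, List.nil_append]
  by_cases hf : filas ≤ 0
  · rw [if_pos hf, PySem.List.pyRange_one_eq_nil hf, List.map_nil]
  rw [if_neg hf]
  apply List.map_congr_left
  intro row _
  rw [innerA_eq_map]
  by_cases hrow : row = 0 ∨ row = filas - 1
  · rw [if_pos hrow, inner_border filas columnas row hrow]
  · rw [if_neg hrow,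
        inner_interior filas columnas row (fun h => hrow (Or.inl h)) (fun h => hrow (Or.inr h))]
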